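-- pv_equiv track=rewrite | github.com/nounome/pat | PAT/1014.py | insert_dui
-- ===== SOURCE A (Python) =====
-- def insert_dui(dui,yuansu):     #入队
--     len_dui=[len(d) for d in dui]
--     min_v=min(len_dui)
--
--     index=[]
--     for i,d in enumerate(dui):
--         if len(d)==min_v:
--             index.append(i)
--
--     dui[index[0]].append(yuansu)
--
--     return dui
-- ===== SOURCE B (Python) =====
-- def insert_dui(dui, yuansu):     # 入队: single pass keeping the running first-min index
--     best = 0
--     for j in range(1, len(dui)):
--         if len(dui[j]) < len(dui[best]):
--             best = j
--     dui[best].append(yuansu)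
--     return dui
-- ===== Notes on version B (the rewrite author's own statement) =====
-- stated objective: simpler
-- what changed: Replaces A's three passes (build the length list, take its min, collect all tied indices, index [0]) with one left-to-right pass keeping the running first-min index (strict-< update preserves first-on-ties).
import Mathlib
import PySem

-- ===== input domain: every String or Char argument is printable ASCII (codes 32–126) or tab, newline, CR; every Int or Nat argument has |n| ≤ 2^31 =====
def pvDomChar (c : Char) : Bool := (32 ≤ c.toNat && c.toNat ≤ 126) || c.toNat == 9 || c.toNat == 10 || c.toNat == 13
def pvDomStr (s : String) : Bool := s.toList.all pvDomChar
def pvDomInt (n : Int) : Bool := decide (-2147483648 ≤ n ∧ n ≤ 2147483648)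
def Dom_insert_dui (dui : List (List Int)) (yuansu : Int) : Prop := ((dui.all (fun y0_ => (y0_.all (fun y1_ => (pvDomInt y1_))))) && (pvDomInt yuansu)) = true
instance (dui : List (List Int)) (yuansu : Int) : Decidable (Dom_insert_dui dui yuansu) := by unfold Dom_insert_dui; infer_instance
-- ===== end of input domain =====

-- B replaces A's three passes (length list, min, collect all tied indices, take [0]) by one
-- running first-argmin pass (simpler, same O(n)). Both programs mutate dui in place (append to the
-- chosen queue) identically; the equivalence proved here is about the RETURN value.

-- ===== PORT A =====
def insert_dui (dui : List (List Int)) (yuansu : Int) : List (List Int) :=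
  let len_dui := dui.map (fun d => (d.length : Int))
  match PySem.List.min? len_dui (fun x => x) with
  | none => dui        -- Python: min([]) raises ValueError here; excluded by Pre_
  | some min_v =>
    let index := (PySem.List.enumerate dui 0).foldl
      (fun acc p => if (p.2.length : Int) == min_v then acc ++ [p.1] else acc) ([] : List Int)
    match PySem.List.pyGet? index 0 with
    | none => dui      -- index[0] IndexError; unreachable (index is nonempty when dui ≠ [])
    | some i =>
      PySem.List.pySetD dui i ((PySem.List.pyGetD dui i []) ++ [yuansu])

-- ===== PORT B =====
def insert_dui_alt (dui : List (List Int)) (yuansu : Int) : List (List Int) :=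
  let best := (PySem.List.pyRange 1 (dui.length : Int) 1).foldl
    (fun b j => if (PySem.List.pyGetD dui j []).length < (PySem.List.pyGetD dui b []).length
                then j else b) (0 : Int)
  PySem.List.pySetD dui best ((PySem.List.pyGetD dui best []) ++ [yuansu])

-- ===== PRECONDITION & SPEC =====
-- Pre_ excludes only the empty list of queues, on which Python A raises ValueError (min of an empty list); B also raises there (IndexError).
def Pre_insert_dui (dui : List (List Int)) (yuansu : Int) : Prop := dui ≠ []
instance (dui : List (List Int)) (yuansu : Int) : Decidable (Pre_insert_dui dui yuansu) := by unfold Pre_insert_dui; infer_instance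
def pvWitness_insert_dui : List (List Int) × Int := ([[1, 2], [3]], 7)

def Spec_insert_dui (dui : List (List Int)) (yuansu : Int) (out : List (List Int)) : Prop := out = insert_dui_alt dui yuansu
instance (dui : List (List Int)) (yuansu : Int) (out : List (List Int)) : Decidable (Spec_insert_dui dui yuansu out) := by unfold Spec_insert_dui; infer_instance

-- ===== CLAIM (what is proved, stated in full; the proofs are below) =====
def Claim_equal_insert_dui : Prop := ∀ (dui : List (List Int)) (yuansu : Int), Dom_insert_dui dui yuansu → Pre_insert_dui dui yuansu → Spec_insert_dui dui yuansu (insert_dui dui yuansu)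

-- ===== LEMMAS AND PROOFS =====

-- 'b is the index of the FIRST shortest queue of dui': characterizes both A's index[0] and B's best.
def GoodIdx (dui : List (List Int)) (b : Nat) : Prop :=
  b < dui.length ∧
  (∀ j, j < dui.length → (dui.getD b []).length ≤ (dui.getD j []).length) ∧
  (∀ j, j < b → (dui.getD b []).length < (dui.getD j []).length)

theorem GoodIdx_unique (dui : List (List Int)) (b1 b2 : Nat)
    (h1 : GoodIdx dui b1) (h2 : GoodIdx dui b2) : b1 = b2 := by
  obtain ⟨hl1, hmin1, hfst1⟩ := h1
  obtain ⟨hl2, hmin2, hfst2⟩ := h2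
  rcases lt_trichotomy b1 b2 with h | h | h
  · exact absurd (hmin1 b2 hl2) (not_le.mpr (hfst2 b1 h))
  · exact h
  · exact absurd (hmin2 b1 hl1) (not_le.mpr (hfst1 b2 h))

-- B's running argmin over range(1, k) lands on the first shortest index among the first k queues.
theorem b_fold_good (dui : List (List Int)) (k : Nat) (hk : 1 ≤ k) (hkn : k ≤ dui.length) :
    ∃ b : Nat,
      (PySem.List.pyRange 1 (k : Int) 1).foldl
        (fun b j => if (PySem.List.pyGetD dui j []).length < (PySem.List.pyGetD dui b []).length
                    then j else b) (0 : Int) = (b : Int) ∧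
      b < k ∧
      (∀ j, j < k → (dui.getD b []).length ≤ (dui.getD j []).length) ∧
      (∀ j, j < b → (dui.getD b []).length < (dui.getD j []).length) := by
  induction k with
  | zero => omega
  | succ k ih =>
    by_cases hk1 : k = 0
    · subst hk1
      refine ⟨0, ?_, by omega, ?_, by omega⟩
      · rw [show ((0 + 1 : Nat) : Int) = 1 by norm_num,
            PySem.List.pyRange_one_eq_nil (le_refl (1 : Int))]
        rfl
      · intro j hj; interval_cases j; exact le_refl _
    · obtain ⟨b, hb, hbk, hmin, hfst⟩ := ih (by omega) (by omega)
      have hsplit : PySem.List.pyRange 1 ((k + 1 : Nat) : Int) 1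
          = PySem.List.pyRange 1 (k : Int) 1 ++ [(k : Int)] := by
        push_cast
        exact PySem.List.pyRange_one_succ_right (by exact_mod_cast Nat.one_le_iff_ne_zero.mpr hk1)
      rw [hsplit, List.foldl_append, hb]
      simp only [List.foldl_cons, List.foldl_nil, PySem.List.pyGetD_natCast]
      by_cases hc : (dui.getD k []).length < (dui.getD b []).length
      · rw [if_pos hc]
        refine ⟨k, rfl, by omega, ?_, ?_⟩
        · intro j hj
          rcases Nat.lt_succ_iff_lt_or_eq.mp hj with hj' | hj'
          · exact le_of_lt (lt_of_lt_of_le hc (hmin j hj'))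
          · subst hj'; exact le_refl _
        · intro j hj; exact lt_of_lt_of_le hc (hmin j hj)
      · rw [if_neg hc]
        refine ⟨b, rfl, by omega, ?_, hfst⟩
        intro j hj
        rcases Nat.lt_succ_iff_lt_or_eq.mp hj with hj' | hj'
        · exact hmin j hj'
        · subst hj'; exact le_of_not_gt hc

-- First element of the filtered enumeration: its index is the first position satisfying q.
theorem head_filter_enum (q : List Int → Bool) :
    ∀ (xs : List (List Int)) (s : Int), (∃ x ∈ xs, q x = true) →
    ∃ (i : Nat) (t : List Int),
      ((PySem.List.enumerate xs s).foldl
        (fun acc p => if q p.2 then acc ++ [p.1] else acc) ([] : List Int)) = (s + i) :: t ∧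
      i < xs.length ∧ q (xs.getD i []) = true ∧ ∀ j, j < i → q (xs.getD j []) = false := by
  intro xs
  induction xs with
  | nil => rintro s ⟨x, hx, _⟩; simp at hx
  | cons x xs ih =>
    intro s hex
    rw [PySem.List.enumerate_cons]
    by_cases hqx : q x = true
    · refine ⟨0, ((PySem.List.enumerate xs (s + 1)).filter (fun p => q p.2)).map (·.1),
        ?_, by simp, by simpa using hqx, by omega⟩
      rw [show s + ((0 : Nat) : Int) = s by simp]
      simp only [List.foldl_cons, hqx, if_true, List.nil_append]
      exact PySem.List.foldl_append_if _ _ _ _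
    · have hqx' : q x = false := Bool.eq_false_iff.mpr hqx
      obtain ⟨y, hy, hqy⟩ := hex
      have hy' : y ∈ xs := by
        rcases List.mem_cons.mp hy with h | h
        · subst h; exact absurd hqy hqx
        · exact h
      obtain ⟨i, t, hfold, hilen, hqi, hprev⟩ := ih (s + 1) ⟨y, hy', hqy⟩
      refine ⟨i + 1, t, ?_, by simpa using hilen, by simpa using hqi, ?_⟩
      · simp only [List.foldl_cons, hqx', Bool.false_eq_true, if_false]
        rw [hfold]
        congr 1
        push_cast
        ring
      · intro j hj
        cases j with
        | zero => simpa using hqx'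
        | succ j => simpa using hprev j (by omega)

-- A's chosen index satisfies GoodIdx.
theorem a_index_good (dui : List (List Int)) (hne : dui ≠ []) :
    ∃ b : Nat, GoodIdx dui b ∧
      ∀ yuansu, insert_dui dui yuansu
        = PySem.List.pySetD dui (b : Int) ((PySem.List.pyGetD dui (b : Int) []) ++ [yuansu]) := by
  have hne' : dui.map (fun d => (d.length : Int)) ≠ [] := by simpa using hne
  cases h : PySem.List.min? (dui.map (fun d => (d.length : Int))) (fun x => x) with
  | none => exact absurd ((PySem.List.min?_eq_none_iff _ _).mp h) hne'
  | some m =>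
    have hm_mem := PySem.List.min?_mem h
    have hm_min := PySem.List.min?_isMin h
    obtain ⟨d, hd, hdm⟩ := List.mem_map.mp hm_mem
    obtain ⟨i, t, hfold, hilen, hqi, hprev⟩ :=
      head_filter_enum (fun d => (d.length : Int) == m) dui 0 ⟨d, hd, by simpa using hdm⟩
    have hqi' : ((dui.getD i []).length : Int) = m := by simpa using hqi
    have hmle : ∀ j, j < dui.length → m ≤ ((dui.getD j []).length : Int) := by
      intro j hj
      exact hm_min _ (List.mem_map.mpr ⟨dui.getD j [], (by rw [List.getD_eq_getElem dui [] hj]; exact List.getElem_mem hj), rfl⟩)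
    refine ⟨i, ⟨hilen, ?_, ?_⟩, ?_⟩
    · intro j hj
      have h1 := hmle j hj
      rw [← hqi'] at h1
      exact_mod_cast h1
    · intro j hj
      have h1 := hmle j (lt_trans hj hilen)
      have h2 : ((dui.getD j []).length : Int) ≠ m := by simpa using hprev j hj
      have h3 : m < ((dui.getD j []).length : Int) := lt_of_le_of_ne h1 (Ne.symm h2)
      rw [← hqi'] at h3
      exact_mod_cast h3
    · intro yuansu
      have h0 : (0 : Int) + (i : Nat) = (i : Nat) := by ring
      rw [h0] at hfold
      have hget : PySem.List.pyGet? (((i : Nat) : Int) :: t) 0 = some ((i : Nat) : Int) := by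
        simp [PySem.List.pyGet?, PySem.List.pyIdx?]
      unfold insert_dui
      simp only [h, hfold, hget]

theorem insert_dui_spec : Claim_equal_insert_dui := by
  intro dui yuansu _ hpre
  unfold Spec_insert_dui
  obtain ⟨bA, hgA, hA⟩ := a_index_good dui hpre
  have hlen : 1 ≤ dui.length := by
    cases dui with
    | nil => exact absurd rfl hpre
    | cons _ _ => simp
  obtain ⟨bB, hfold, h1, h2, h3⟩ := b_fold_good dui dui.length hlen (le_refl _)
  have hgB : GoodIdx dui bB := ⟨h1, h2, h3⟩
  have hbb : bA = bB := GoodIdx_unique dui bA bB hgA hgB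
  rw [hA yuansu, insert_dui_alt]
  simp only [hfold, hbb]
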